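-- pv_equiv track=rewrite | github.com/raylau1/mocha | util/rdlgenerator.py | register_is_flag_enum
-- ===== SOURCE A (Python) =====
-- def fields_ascending_by_lsb(register: dict) -> list[dict]:
--     """Sort a register's fields in ascending order of lsb."""
--     return sorted(register["fields"], key=lambda field: field["lsb"])
--
-- def register_is_flag_enum(reg: dict) -> bool:
--     """
--     Predicate that checks whether a register consists of only contiguous 1-bit fields starting at
--     the LSB of the register, so that the register fields can be emitted as a C enum. Does not apply
--     for registers with 32 1-bit fields as those are lowered to a single uint32_t, and for 1 1-bit
--     field as there is no advantage in having an enum with a single variant over a boolean field.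
--     """
--     fields = reg["fields"]
--     if len(fields) == 1 or len(fields) == 32:
--         return False
--     for i, field in enumerate(fields_ascending_by_lsb(reg)):
--         if field["lsb"] != i or field["width"] != 1:
--             return False
--     return True
-- ===== SOURCE B (Python) =====
-- def register_is_flag_enum(reg: dict) -> bool:
--     fields = reg["fields"]
--     n = len(fields)
--     if n == 1 or n == 32:
--         return False
--     if {field["lsb"] for field in fields} != set(range(n)):
--         return False
--     return all(field["width"] == 1 for field in fields)
-- ===== Notes on version B (the rewrite author's own statement) =====
-- stated objective: simpler
-- what changed: B drops the sort-and-enumerate scan: it compares the set of lsb values against set(range(n)) (which forces a duplicate-free contiguous 0..n-1 layout) and only then checks every width in one plain pass.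
-- outside the precondition, e.g. on register_is_flag_enum({'fields': [{'lsb': 1}, {'lsb': 0, 'width': 2}]}): A returns False, B raises KeyError
import Mathlib
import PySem

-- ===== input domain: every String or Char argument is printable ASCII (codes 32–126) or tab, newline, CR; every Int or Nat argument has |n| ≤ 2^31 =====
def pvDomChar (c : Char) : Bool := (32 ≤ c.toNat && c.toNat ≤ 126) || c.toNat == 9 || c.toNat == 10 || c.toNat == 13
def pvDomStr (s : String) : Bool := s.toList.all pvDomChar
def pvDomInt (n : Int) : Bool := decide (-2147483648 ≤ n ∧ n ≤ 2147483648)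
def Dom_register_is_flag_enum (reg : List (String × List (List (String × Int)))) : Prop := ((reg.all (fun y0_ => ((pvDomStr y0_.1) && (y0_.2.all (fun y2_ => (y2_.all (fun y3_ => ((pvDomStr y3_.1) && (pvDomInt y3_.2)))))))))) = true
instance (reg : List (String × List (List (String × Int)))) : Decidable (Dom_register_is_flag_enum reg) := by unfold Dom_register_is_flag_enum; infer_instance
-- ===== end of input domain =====

-- B replaces A's sort-and-enumerate scan by a set comparison of the lsb values with range(n),
-- followed by one plain width pass: simpler, no sorted order and no index counter maintained.


-- ===== PORT A =====
-- field["lsb"] used as sort key: Python raises KeyError when missing; `.getD 0` is exact on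
-- Pre_ (every field carries "lsb"), which excludes the raising inputs.
def pvLsbKey (f : List (String × Int)) : Int := ((PySem.Dict.mk f).get? "lsb").getD 0

def fields_ascending_by_lsb (reg : List (String × List (List (String × Int)))) :
    List (List (String × Int)) :=
  PySem.List.sorted (((PySem.Dict.mk reg).get? "fields").getD []) pvLsbKey

-- the `for i, field in enumerate(...)` loop with its early `return False`
-- (`get? == some i` is exact where "lsb"/"width" are present, i.e. on Pre_)
def pvLoopA (i : Int) : List (List (String × Int)) → Bool
  | [] => true
  | f :: rest =>
    if ((PySem.Dict.mk f).get? "lsb" != some i) || ((PySem.Dict.mk f).get? "width" != some 1) then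
      false
    else pvLoopA (i + 1) rest

def register_is_flag_enum (reg : List (String × List (List (String × Int)))) : Bool :=
  let fields := ((PySem.Dict.mk reg).get? "fields").getD []
  if fields.length = 1 ∨ fields.length = 32 then false
  else pvLoopA 0 (fields_ascending_by_lsb reg)

-- ===== PORT B =====
-- {field["lsb"] for field in fields} vs set(range(n)): ported over Option Int (a missing key,
-- excluded by Pre_, becomes `none`, which can never meet the `some`-mapped range).
def register_is_flag_enum_alt (reg : List (String × List (List (String × Int)))) : Bool :=
  let fields := ((PySem.Dict.mk reg).get? "fields").getD []
  let n : Int := fields.length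
  if n = 1 ∨ n = 32 then false
  else if ¬ (PySem.Set.equal
        (PySem.Set.ofList (fields.map (fun f => (PySem.Dict.mk f).get? "lsb")))
        (PySem.Set.ofList ((PySem.List.pyRange 0 n).map some)) = true) then false
  else fields.all (fun f => (PySem.Dict.mk f).get? "width" == some 1)

-- ===== PRECONDITION & SPEC =====
-- Pre_ excludes exactly the registers on which Python A raises KeyError (no "fields" key; a field
-- without "lsb" when the field count is not 1/32; a missing "width" on the first field of each lsb
-- value v >= 0 that sits on a matched prefix 0..v-1 of unique lsb values whose fields all have
-- width 1 — the fields A's short-circuit scan actually reads) and, the only inputs A still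
-- returns on, registers whose lsb values are a permutation of 0..n-1 but with a "width" missing
-- behind an earlier non-1 width in lsb order: there A short-circuits to False while B's
-- original-order width scan still raises KeyError.
def Pre_register_is_flag_enum (reg : List (String × List (List (String × Int)))) : Prop :=
  ((PySem.Dict.mk reg).get? "fields").isSome = true ∧
  (let fields := ((PySem.Dict.mk reg).get? "fields").getD []
   let lsbs := fields.map pvLsbKey
   fields.length = 1 ∨ fields.length = 32 ∨
     ((∀ f ∈ fields, ((PySem.Dict.mk f).get? "lsb").isSome = true) ∧
      (∀ i ∈ List.range fields.length,
        (0 ≤ lsbs.getD i 0 ∧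
         (∀ j ∈ PySem.List.pyRange 0 (lsbs.getD i 0), lsbs.count j = 1) ∧
         ((lsbs.countP (fun x => decide (x < lsbs.getD i 0)) : Int) = lsbs.getD i 0) ∧
         (∀ j ∈ List.range i, lsbs.getD j 0 ≠ lsbs.getD i 0) ∧
         (∀ g ∈ fields, pvLsbKey g < lsbs.getD i 0 → (PySem.Dict.mk g).get? "width" = some 1))
        → ((PySem.Dict.mk (fields.getD i [])).get? "width").isSome = true) ∧
      ((∀ j ∈ PySem.List.pyRange 0 (fields.length : Int), lsbs.count j = 1) →
        ∀ f ∈ fields, ((PySem.Dict.mk f).get? "width").isSome = true)))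
instance (reg : List (String × List (List (String × Int)))) : Decidable (Pre_register_is_flag_enum reg) := by unfold Pre_register_is_flag_enum; infer_instance

def pvWitness_register_is_flag_enum : (List (String × List (List (String × Int)))) :=
  [("fields", [[("lsb", 0), ("width", 1)], [("lsb", 1), ("width", 1)]])]

def Spec_register_is_flag_enum (reg : List (String × List (List (String × Int)))) (out : Bool) : Prop := out = register_is_flag_enum_alt reg
instance (reg : List (String × List (List (String × Int)))) (out : Bool) : Decidable (Spec_register_is_flag_enum reg out) := by unfold Spec_register_is_flag_enum; infer_instance

-- ===== CLAIM (what is proved, stated in full; the proofs are below) =====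
def Claim_equal_register_is_flag_enum : Prop := ∀ (reg : List (String × List (List (String × Int)))), Dom_register_is_flag_enum reg → Pre_register_is_flag_enum reg → Spec_register_is_flag_enum reg (register_is_flag_enum reg)

-- ===== LEMMAS AND PROOFS =====

-- lsb-part of A's loop, separated out
def pvLsbOK (i : Int) : List (List (String × Int)) → Bool
  | [] => true
  | f :: rest => ((PySem.Dict.mk f).get? "lsb" == some i) && pvLsbOK (i + 1) rest

theorem pvLoopA_split (L : List (List (String × Int))) : ∀ i : Int,
    pvLoopA i L = (pvLsbOK i L && L.all (fun f => (PySem.Dict.mk f).get? "width" == some 1)) := by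
  induction L with
  | nil => intro i; rfl
  | cons f rest ih =>
    intro i
    simp only [pvLoopA, pvLsbOK, List.all_cons, ih]
    by_cases h1 : (PySem.Dict.mk f).get? "lsb" = some i <;>
      by_cases h2 : (PySem.Dict.mk f).get? "width" = some 1 <;>
        simp [h1, h2]

theorem pvLsbOK_iff (L : List (List (String × Int))) : ∀ i : Int,
    pvLsbOK i L = true ↔ ∀ j : Nat, (h : j < L.length) → (PySem.Dict.mk L[j]).get? "lsb" = some (i + j) := by
  induction L with
  | nil => intro i; simp [pvLsbOK]
  | cons f rest ih =>
    intro i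
    simp only [pvLsbOK, Bool.and_eq_true, beq_iff_eq, ih]
    constructor
    · rintro ⟨h0, hr⟩ j hj
      cases j with
      | zero => simpa using h0
      | succ k =>
        have := hr k (by simpa using hj)
        simpa [add_assoc, add_comm, add_left_comm] using this
    · intro h
      refine ⟨by simpa using h 0 (by simp), fun k hk => ?_⟩
      have := h (k + 1) (by simpa using hk)
      simpa [add_assoc, add_comm, add_left_comm] using this


theorem pvKeyed (f : List (String × Int)) (h : ((PySem.Dict.mk f).get? "lsb").isSome = true) :
    (PySem.Dict.mk f).get? "lsb" = some (pvLsbKey f) := by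
  cases hg : (PySem.Dict.mk f).get? "lsb" with
  | none => rw [hg] at h; simp at h
  | some v => simp [pvLsbKey, hg]

-- the heart of the equivalence: A's "sorted fields have lsb = 0,1,2,…" check is exactly
-- B's "the lsb values form the set {0,…,n-1}" check (given every field carries "lsb")
theorem pvMain (fields : List (List (String × Int)))
    (hpres : ∀ f ∈ fields, ((PySem.Dict.mk f).get? "lsb").isSome = true) :
    pvLsbOK 0 (PySem.List.sorted fields pvLsbKey) = true ↔
      ∀ x, x ∈ fields.map (fun f => (PySem.Dict.mk f).get? "lsb") ↔
           x ∈ (PySem.List.pyRange 0 (fields.length : Int)).map some := by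
  set S := PySem.List.sorted fields pvLsbKey with hSdef
  set g := fun f => (PySem.Dict.mk f).get? "lsb" with hg
  have hperm : S.Perm fields := PySem.List.sorted_perm fields pvLsbKey false
  have hlenS : S.length = fields.length := hperm.length_eq
  have hlenR : (PySem.List.pyRange 0 (fields.length : Int)).length = fields.length := by
    rw [PySem.List.length_pyRange_one]; omega
  constructor
  · intro h x
    have hj := (pvLsbOK_iff S 0).mp h
    have heq : S.map g = (PySem.List.pyRange 0 (fields.length : Int)).map some := by
      apply List.ext_getElem (by simp [hlenS, hlenR])
      intro j h1 h2
      simp only [List.getElem_map, hg]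
      rw [hj j (by simpa using h1), PySem.List.getElem_pyRange_one]
    have hp2 : (fields.map g).Perm ((PySem.List.pyRange 0 (fields.length : Int)).map some) :=
      heq ▸ (hperm.map g).symm
    exact hp2.mem_iff
  · intro h
    have hBnd : ((PySem.List.pyRange 0 (fields.length : Int)).map some).Nodup :=
      (PySem.List.nodup_pyRange_one 0 _).map (Option.some_injective _)
    have hsub : ((PySem.List.pyRange 0 (fields.length : Int)).map some) ⊆ fields.map g :=
      fun x hx => (h x).mpr hx
    have hp : ((PySem.List.pyRange 0 (fields.length : Int)).map some).Perm (fields.map g) :=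
      (hBnd.subperm hsub).perm_of_length_le (by simp [hlenR])
    have hgk : fields.map g = (fields.map pvLsbKey).map some := by
      rw [List.map_map]
      exact List.map_congr_left (fun f hf => pvKeyed f (hpres f hf))
    have hkp : (fields.map pvLsbKey).Perm (PySem.List.pyRange 0 (fields.length : Int)) := by
      have h2 := hp.symm
      rw [hgk] at h2
      exact (List.map_perm_map_iff (Option.some_injective _)).mp h2
    have hkS : (S.map pvLsbKey).Perm (PySem.List.pyRange 0 (fields.length : Int)) :=
      (hperm.map pvLsbKey).trans hkp
    have hpair : (S.map pvLsbKey).Pairwise (· ≤ ·) :=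
      PySem.List.sorted_map_key_pairwise fields pvLsbKey
    have hpairR : (PySem.List.pyRange 0 (fields.length : Int)).Pairwise (· ≤ ·) :=
      (PySem.List.pairwise_lt_pyRange_one 0 _).imp le_of_lt
    have hEq : S.map pvLsbKey = PySem.List.pyRange 0 (fields.length : Int) :=
      hkS.eq_of_pairwise (fun a b _ _ hab hba => le_antisymm hab hba) hpair hpairR
    apply (pvLsbOK_iff S 0).mpr
    intro j hj
    have hmem : S[j] ∈ fields := hperm.mem_iff.mp (List.getElem_mem hj)
    rw [pvKeyed _ (hpres _ hmem)]
    calc some (pvLsbKey S[j]) = (S.map pvLsbKey)[j]? := by simp [hj]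
      _ = (PySem.List.pyRange 0 (fields.length : Int))[j]? := by rw [hEq]
      _ = some (0 + (j : Int)) := by
          rw [List.getElem?_eq_getElem (by rw [PySem.List.length_pyRange_one]; omega)]
          simp [PySem.List.getElem_pyRange_one]

-- ===== VERDICT (by name: the statement is the Claim_ definition above) =====
theorem register_is_flag_enum_spec : Claim_equal_register_is_flag_enum := by
  intro reg _ hpre
  obtain ⟨h1, h2⟩ := hpre
  obtain ⟨fields, hd⟩ := Option.isSome_iff_exists.mp h1
  simp only [hd, Option.getD_some] at h2
  unfold Spec_register_is_flag_enum register_is_flag_enum register_is_flag_enum_alt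
    fields_ascending_by_lsb
  simp only [hd, Option.getD_some]
  by_cases hg : fields.length = 1 ∨ fields.length = 32
  · rcases hg with h | h <;> simp [h]
  · have hg' : ¬((fields.length : Int) = 1 ∨ (fields.length : Int) = 32) := by
      intro hc; apply hg
      rcases hc with h | h <;> [left; right] <;> exact_mod_cast h
    have hpres : ∀ f ∈ fields, ((PySem.Dict.mk f).get? "lsb").isSome = true := by
      rcases h2 with h | h | h
      · exact absurd (Or.inl h) hg
      · exact absurd (Or.inr h) hg
      · exact fun f hf => h.1 f hf
    simp only [if_neg hg, if_neg hg']
    rw [pvLoopA_split]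
    by_cases hset : PySem.Set.equal
        (PySem.Set.ofList (fields.map fun f => (PySem.Dict.mk f).get? "lsb"))
        (PySem.Set.ofList ((PySem.List.pyRange 0 (fields.length : Int)).map some)) = true
    · have hmem : ∀ x, x ∈ fields.map (fun f => (PySem.Dict.mk f).get? "lsb") ↔
          x ∈ (PySem.List.pyRange 0 (fields.length : Int)).map some := by
        intro x
        have := (PySem.Set.equal_iff _ _).mp hset x
        simpa [PySem.Set.mem_ofList] using this
      have hok := (pvMain fields hpres).mpr hmem
      simp only [hset, not_true_eq_false, if_false, hok, Bool.true_and]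
      exact (PySem.List.sorted_perm fields pvLsbKey false).all_eq
    · have hok : pvLsbOK 0 (PySem.List.sorted fields pvLsbKey) = false := by
      
        cases hl : pvLsbOK 0 (PySem.List.sorted fields pvLsbKey) with
        | false => rfl
        | true =>
          exact absurd ((PySem.Set.equal_iff _ _).mpr (fun x => by
            simpa [PySem.Set.mem_ofList] using (pvMain fields hpres).mp hl x)) hset
      simp [hset, hok]
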